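-- pv_equiv track=rewrite | github.com/drebee/altcaps_codereview | example1.py | alt_caps
-- ===== SOURCE A (Python) =====
-- def alt_caps(original_string):
--    new_string = ""
--    letter_count = 0
--    for char in original_string:
--        if char.isalpha():
--            if letter_count % 2 == 0:
--                new_string += char.lower()
--            else:
--                new_string += char.upper()
--            letter_count += 1
--        else:
--            new_string += char
--    return new_string
-- ===== SOURCE B (Python) =====
-- def alt_caps(original_string):
--     letters = [c for c in original_string if c.isalpha()]
--     transformed = (c.lower() if i % 2 == 0 else c.upper() for i, c in enumerate(letters))
--     return ''.join(next(transformed) if c.isalpha() else c for c in original_string)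
-- ===== Notes on version B (the rewrite author's own statement) =====
-- stated objective: alternative
-- what changed: Replaces A's single counting loop with a two-stage extract/transform/reweave pipeline: collect the letters, case-alternate them by their letter index, then weave them back over the original string via a generator.
import Mathlib
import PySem

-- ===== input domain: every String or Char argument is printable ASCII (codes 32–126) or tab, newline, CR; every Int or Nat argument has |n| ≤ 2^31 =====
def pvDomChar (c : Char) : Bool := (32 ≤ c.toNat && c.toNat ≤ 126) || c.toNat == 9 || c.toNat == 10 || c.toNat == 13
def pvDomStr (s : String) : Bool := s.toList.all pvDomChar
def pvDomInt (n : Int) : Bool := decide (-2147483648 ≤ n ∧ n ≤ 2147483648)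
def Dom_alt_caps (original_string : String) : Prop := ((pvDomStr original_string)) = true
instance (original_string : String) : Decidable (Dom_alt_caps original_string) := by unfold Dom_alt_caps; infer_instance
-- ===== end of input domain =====

-- B replaces A's single counting loop by an extract/transform/reweave pipeline (same result, same cost).

-- ===== PORT A =====
-- A: one pass, accumulating the new string and a letter counter.
def alt_caps (original_string : String) : String :=
  let st := original_string.toList.foldl
    (fun (st : List Char × Nat) char =>
      if PySem.Chars.isalpha char then
        (if st.2 % 2 = 0 then (st.1 ++ [PySem.Chars.lowerChar char], st.2 + 1)
         else (st.1 ++ [PySem.Chars.upperChar char], st.2 + 1))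
      else (st.1 ++ [char], st.2))
    ([], 0)
  String.mk st.1

-- ===== PORT B =====
-- B's generator '(c.lower() if i % 2 = 0 else c.upper() for i, c in enumerate(letters))'
def altTransform (i : Nat) : List Char → List Char
  | [] => []
  | c :: cs =>
    (if i % 2 = 0 then PySem.Chars.lowerChar c else PySem.Chars.upperChar c) :: altTransform (i + 1) cs

-- B's final join: take the next transformed letter where the original char is alphabetic.
def altReweave : List Char → List Char → List Char
  | [], _ => []
  | c :: cs, ts =>
    if PySem.Chars.isalpha c then
      match ts with
      | t :: ts' => t :: altReweave cs ts'
      | [] => []   -- unreachable: there is a transformed letter for every alphabetic char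
    else c :: altReweave cs ts

def alt_caps_alt (original_string : String) : String :=
  let letters := original_string.toList.filter PySem.Chars.isalpha
  String.mk (altReweave original_string.toList (altTransform 0 letters))

-- ===== PRECONDITION & SPEC =====
def Spec_alt_caps (original_string : String) (out : String) : Prop := out = alt_caps_alt original_string
instance (original_string : String) (out : String) : Decidable (Spec_alt_caps original_string out) := by unfold Spec_alt_caps; infer_instance

-- ===== CLAIM (what is proved, stated in full; the proofs are below) =====
def Claim_equal_alt_caps : Prop := ∀ (original_string : String), Dom_alt_caps original_string → Spec_alt_caps original_string (alt_caps original_string)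

-- ===== LEMMAS AND PROOFS =====
theorem alt_caps_loop_eq (l : List Char) : ∀ (acc : List Char) (k : Nat),
    (l.foldl
      (fun (st : List Char × Nat) char =>
        if PySem.Chars.isalpha char then
          (if st.2 % 2 = 0 then (st.1 ++ [PySem.Chars.lowerChar char], st.2 + 1)
           else (st.1 ++ [PySem.Chars.upperChar char], st.2 + 1))
        else (st.1 ++ [char], st.2))
      (acc, k)).1
    = acc ++ altReweave l (altTransform k (l.filter PySem.Chars.isalpha)) := by
  induction l with
  | nil => intro acc k; simp [altReweave]
  | cons c cs ih =>
    intro acc k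
    by_cases h : PySem.Chars.isalpha c = true
    · by_cases hk : k % 2 = 0 <;>
        simp [List.foldl_cons, h, hk, altTransform, altReweave, ih, List.append_assoc]
    · simp [List.foldl_cons, h, altReweave, ih, List.append_assoc]

-- ===== VERDICT (by name: the statement is the Claim_ definition above) =====
theorem alt_caps_spec : Claim_equal_alt_caps := by
  intro s _
  show alt_caps s = alt_caps_alt s
  simp only [alt_caps, alt_caps_alt]
  rw [alt_caps_loop_eq, List.nil_append]
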